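-- pv_equiv track=rewrite | github.com/hemraj-shaqawal/classPractice | 23DecClass.py | str_len
-- ===== SOURCE A (Python) =====
-- def str_len(s):
--     """ input will be string and it will give you length of string."""
--     if type(s) == str:
--         count = 0
--         for item in s:
--             count = count  + 1;
--
--         return count;
--     else:
--         return "input type is not string."
-- ===== SOURCE B (Python) =====
-- def str_len(s):
--     """ input will be string and it will give you length of string."""
--     if type(s) == str:
--         return len(s)
--     else:
--         return "input type is not string."
-- ===== Notes on version B (the rewrite author's own statement) =====
-- stated objective: faster
-- what changed: Replaces the character-by-character counting loop with the built-in len(s), a direct length query instead of an O(n) accumulator scan.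
import Mathlib
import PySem

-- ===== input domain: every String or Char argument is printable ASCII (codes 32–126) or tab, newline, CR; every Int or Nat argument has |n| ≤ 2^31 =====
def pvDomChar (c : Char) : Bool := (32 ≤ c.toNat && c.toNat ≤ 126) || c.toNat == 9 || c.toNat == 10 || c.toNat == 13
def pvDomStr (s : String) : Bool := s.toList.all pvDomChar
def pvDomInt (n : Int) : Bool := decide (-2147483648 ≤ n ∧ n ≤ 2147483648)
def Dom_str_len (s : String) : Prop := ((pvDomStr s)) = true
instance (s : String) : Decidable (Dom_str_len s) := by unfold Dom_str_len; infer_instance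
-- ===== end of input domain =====

-- B replaces A's per-character counting loop with a direct length call; the
-- Lean argument is always a String, so A's type guard is vacuously the true branch.

-- ===== PORT A =====
-- A: count = 0; for item in s: count = count + 1; return count
def str_len (s : String) : Int :=
  s.toList.foldl (fun count _ => count + 1) 0

-- ===== PORT B =====
-- B: return len(s)
def str_len_alt (s : String) : Int :=
  PySem.Str.len s

-- ===== PRECONDITION & SPEC =====
def Spec_str_len (s : String) (out : Int) : Prop := out = str_len_alt s
instance (s : String) (out : Int) : Decidable (Spec_str_len s out) := by unfold Spec_str_len; infer_instance

-- ===== CLAIM (what is proved, stated in full; the proofs are below) =====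
def Claim_equal_str_len : Prop := ∀ (s : String), Dom_str_len s → Spec_str_len s (str_len s)

-- ===== LEMMAS AND PROOFS =====
theorem foldl_count (l : List Char) (a : Int) :
    l.foldl (fun count _ => count + 1) a = a + l.length := by
  induction l generalizing a with
  | nil => simp
  | cons c t ih => simp [List.foldl, ih]; omega

-- ===== VERDICT (by name: the statement is the Claim_ definition above) =====
theorem str_len_spec : Claim_equal_str_len := by
  intro s _
  unfold Spec_str_len str_len str_len_alt
  simp [foldl_count, PySem.Str.len]
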